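-- pv_equiv track=rewrite | github.com/hyeonbin123/CordingTest | baekjoon/1036.py | solve
-- ===== SOURCE A (Python) =====
-- def to_decimal(s):
--     return int(s, 36)
--
-- def to_base_36(n):
--     if n == 0:
--         return '0'
--     digits = '0123456789ABCDEFGHIJKLMNOPQRSTUVWXYZ'
--     result = ''
--     while n:
--         result = digits[n % 36] + result
--         n //= 36
--     return result
--
-- def solve(numbers, k):
--     char_count = {}
--     for num in numbers:
--         for char in num:
--             char_count[char] = char_count.get(char, 0) + 1
--
--     char_value = sorted(char_count.keys(), key=lambda x: (char_count[x], x), reverse=True)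
--
--     decimal_numbers = [to_decimal(num) for num in numbers]
--
--     max_values = []
--     for char in char_value:
--         value_increase = sum((35 - to_decimal(char)) * (36 ** i)
--                              for num in numbers
--                              for i, c in enumerate(reversed(num)) if c == char)
--         max_values.append((char, value_increase))
--
--     selected_chars = sorted(max_values, key=lambda x: x[1], reverse=True)[:k]
--
--     for char, _ in selected_chars:
--         for i, num in enumerate(numbers):
--             decimal_numbers[i] += sum((35 - to_decimal(char)) * (36 ** j)
--                                       for j, c in enumerate(reversed(num)) if c == char)
--
--     return to_base_36(sum(decimal_numbers))
-- ===== SOURCE B (Python) =====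
-- def solve(numbers, k):
--     # One pass: flatten every digit occurrence to (char, positional weight 36^i),
--     # accumulate the total value and per-char weight sums, then sort the per-char
--     # gains (35 - digit value) * weight descending and add the top k to the total.
--     pairs = [(c, 36 ** i) for num in numbers for i, c in enumerate(reversed(num))]
--     base = sum(int(c, 36) * w for c, w in pairs)
--     weight = {}
--     for c, w in pairs:
--         weight[c] = weight.get(c, 0) + w
--     gains = sorted(((35 - int(c, 36)) * w for c, w in weight.items()), reverse=True)
--     total = base + sum(gains[:k])
--     if total == 0:
--         return '0'
--     digits = '0123456789ABCDEFGHIJKLMNOPQRSTUVWXYZ'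
--     out = []
--     while total:
--         total, r = divmod(total, 36)
--         out.append(digits[r])
--     return ''.join(reversed(out))
-- ===== Notes on version B (the rewrite author's own statement) =====
-- stated objective: faster
-- what changed: B flattens all digit occurrences once into (char, 36^i) pairs, accumulates the base value and per-char weight sums in a single pass over that list, sorts just the per-char gain integers and adds the top k, instead of A's per-distinct-char rescans of every digit of every number (twice: once for max_values, once more in the update loop) and its mutated decimal_numbers list.
import Mathlib
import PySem

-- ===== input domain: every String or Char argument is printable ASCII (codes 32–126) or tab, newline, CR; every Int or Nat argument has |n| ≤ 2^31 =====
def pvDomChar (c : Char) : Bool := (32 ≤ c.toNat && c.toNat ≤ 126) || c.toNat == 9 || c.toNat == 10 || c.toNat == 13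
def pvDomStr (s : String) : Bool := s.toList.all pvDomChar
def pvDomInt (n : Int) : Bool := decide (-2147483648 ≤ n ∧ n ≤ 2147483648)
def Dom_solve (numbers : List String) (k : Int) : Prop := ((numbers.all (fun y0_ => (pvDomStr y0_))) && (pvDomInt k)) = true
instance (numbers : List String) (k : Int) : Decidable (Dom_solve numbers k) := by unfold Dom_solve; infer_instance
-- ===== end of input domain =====

-- B replaces A's per-distinct-char rescans of every digit (done twice) by one flattened
-- (char, 36^i) pair list, a single accumulation pass and a sort of the per-char gains; measured faster.

-- ===== PORT A =====
-- int(c, 36) for a single base-36 digit char: exact on 0-9/A-Z/a-z, none = ValueError.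
def digVal36 (c : Char) : Option Int :=
  if '0' ≤ c ∧ c ≤ '9' then some ((c.toNat : Int) - 48)
  else if 'A' ≤ c ∧ c ≤ 'Z' then some ((c.toNat : Int) - 55)
  else if 'a' ≤ c ∧ c ≤ 'z' then some ((c.toNat : Int) - 87)
  else none

-- to_decimal = int(s, 36): hand port, exact on nonempty all-base-36-digit strings (all Pre_ admits;
-- full int(s,36) also accepts whitespace/sign/underscore, but on such strings solve raises elsewhere).
def to_decimal (s : String) : Option Int :=
  if s.toList = [] then none
  else s.toList.foldl (fun acc c =>
    match acc, digVal36 c with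
    | some a, some v => some (36 * a + v)
    | _, _ => none) (some 0)

-- the digits table of to_base_36
def B36DIGITS : List Char := "0123456789ABCDEFGHIJKLMNOPQRSTUVWXYZ".toList

-- the 'while n: result = digits[n % 36] + result; n //= 36' loop of A, on n ≥ 0 (Pre_ makes n ≥ 0;
-- for n < 0 the Python loop never terminates, so nothing is claimed there).
def go36A (n : Nat) : List Char :=
  if h : n = 0 then [] else go36A (n / 36) ++ [B36DIGITS.getD (n % 36) '0']
decreasing_by exact Nat.div_lt_self (Nat.pos_of_ne_zero h) (by omega)

def to_base_36 (n : Int) : String :=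
  if n = 0 then "0" else String.ofList (go36A n.toNat)

-- the inner generator of A's final update loop:
-- sum((35 - to_decimal(char)) * 36**j for j, c in enumerate(reversed(num)) if c == char)
def incNumA (ch : Char) (num : String) : Int :=
  (((PySem.List.enumerate num.toList.reverse 0).filter (fun p => p.2 == ch)).map
    (fun p => (35 - (digVal36 ch).getD 0) * (36 : Int) ^ p.1.toNat)).sum

-- A's value_increase generator (flat over numbers; 36**i with i ≥ 0 from enumerate)
def incA (numbers : List String) (ch : Char) : Int :=
  (numbers.flatMap (fun num =>
    (((PySem.List.enumerate num.toList.reverse 0).filter (fun p => p.2 == ch)).map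
      (fun p => (35 - (digVal36 ch).getD 0) * (36 : Int) ^ p.1.toNat)))).sum

def solve (numbers : List String) (k : Int) : String :=
  let char_count : PySem.Dict Char Int :=
    numbers.foldl (fun d num => num.toList.foldl (fun d c => d.insert c (d.getD c 0 + 1)) d)
      PySem.Dict.empty
  let char_value :=
    PySem.List.sorted2 char_count.keys (fun c => char_count.getD c 0) (fun c => c) true
  let decimal_numbers := numbers.map (fun num => (to_decimal num).getD 0)
  let max_values := char_value.foldl (fun acc c => acc ++ [(c, incA numbers c)]) []
  let selected_chars :=
    PySem.List.slice (PySem.List.sorted max_values (fun p => p.2) true) none (some k)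
  -- 'for i, num in enumerate(numbers): decimal_numbers[i] += …' : elementwise update,
  -- lengths equal by construction (decimal_numbers = map over numbers)
  let decimal2 := selected_chars.foldl
    (fun dn p => (dn.zip numbers).map (fun q => q.1 + incNumA p.1 q.2)) decimal_numbers
  to_base_36 decimal2.sum

-- ===== PORT B =====
-- the divmod digit loop of B, collecting digits least-significant first
def go36B (n : Nat) : List Char :=
  if h : n = 0 then [] else B36DIGITS.getD (n % 36) '0' :: go36B (n / 36)
decreasing_by exact Nat.div_lt_self (Nat.pos_of_ne_zero h) (by omega)

-- one flattened pass: every digit occurrence as (char, 36^i)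
def pairsB (numbers : List String) : List (Char × Int) :=
  numbers.flatMap (fun num =>
    (PySem.List.enumerate num.toList.reverse 0).map (fun p => (p.2, (36 : Int) ^ p.1.toNat)))

def solve_alt (numbers : List String) (k : Int) : String :=
  let pairs := pairsB numbers
  let base := (pairs.map (fun p => (digVal36 p.1).getD 0 * p.2)).sum
  let weight : PySem.Dict Char Int :=
    pairs.foldl (fun d p => d.insert p.1 (d.getD p.1 0 + p.2)) PySem.Dict.empty
  let gains := PySem.List.sorted
    (weight.items.map (fun p => (35 - (digVal36 p.1).getD 0) * p.2)) (fun x => x) true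
  let total := base + (PySem.List.slice gains none (some k)).sum
  if total = 0 then "0" else String.ofList (go36B total.toNat).reverse

-- ===== PRECONDITION & SPEC =====
-- Pre_: every string nonempty and made of base-36 digit chars only — exactly where the Python A
-- returns (otherwise int(·, 36) raises ValueError on a number or on a single char).
def Pre_solve (numbers : List String) (k : Int) : Prop :=
  ∀ num ∈ numbers, num.toList ≠ [] ∧ ∀ c ∈ num.toList,
    (('0' ≤ c ∧ c ≤ '9') ∨ ('A' ≤ c ∧ c ≤ 'Z') ∨ ('a' ≤ c ∧ c ≤ 'z'))
instance (numbers : List String) (k : Int) : Decidable (Pre_solve numbers k) := by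
  unfold Pre_solve; infer_instance

def pvWitness_solve : List String × Int := ([], 0)

def Spec_solve (numbers : List String) (k : Int) (out : String) : Prop := out = solve_alt numbers k
instance (numbers : List String) (k : Int) (out : String) : Decidable (Spec_solve numbers k out) := by
  unfold Spec_solve; infer_instance

-- ===== CLAIM (what is proved, stated in full; the proofs are below) =====
def Claim_equal_solve : Prop := ∀ (numbers : List String) (k : Int),
  Dom_solve numbers k → Pre_solve numbers k → Spec_solve numbers k (solve numbers k)

-- ===== LEMMAS AND PROOFS =====


-- abbreviations used only by the proofs
def dv (c : Char) : Int := (digVal36 c).getD 0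
def poswL (cs : List Char) : List (Char × Int) :=
  (PySem.List.enumerate cs.reverse 0).map (fun p => (p.2, (36 : Int) ^ p.1.toNat))
def Wnum (c : Char) (cs : List Char) : Int :=
  (((poswL cs).filter (fun p => p.1 == c)).map (·.2)).sum
def Wtot (numbers : List String) (c : Char) : Int :=
  (numbers.map (fun num => Wnum c num.toList)).sum
def valC (cs : List Char) : Int := cs.foldl (fun a c => 36 * a + dv c) 0

theorem enum_shift {α : Type} (l : List α) (s : Int) :
    PySem.List.enumerate l (s + 1) = (PySem.List.enumerate l s).map (fun p => (p.1 + 1, p.2)) := by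
  induction l generalizing s with
  | nil => simp [PySem.List.enumerate_nil]
  | cons x t ih =>
    rw [PySem.List.enumerate_cons, PySem.List.enumerate_cons, List.map_cons, ← ih]

theorem posw_append (cs : List Char) (c : Char) :
    poswL (cs ++ [c]) = (c, 1) :: (poswL cs).map (fun p => (p.1, 36 * p.2)) := by
  unfold poswL
  rw [List.reverse_append]
  simp only [List.reverse_singleton, List.singleton_append]
  rw [PySem.List.enumerate_cons, List.map_cons]
  rw [show (0 : Int) + 1 = 0 + 1 from rfl, enum_shift]
  rw [List.map_map, List.map_map]
  refine congrArg₂ _ rfl ?_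
  apply List.map_congr_left
  intro p hp
  rw [PySem.List.mem_enumerate_iff] at hp
  obtain ⟨j, hj, rfl⟩ := hp
  simp only [Function.comp]
  have hj1 : ((0 : Int) + j + 1).toNat = j + 1 := by omega
  simp [hj1, pow_succ]
  ring

theorem val_eq (cs : List Char) :
    ((poswL cs).map (fun p => dv p.1 * p.2)).sum = valC cs := by
  induction cs using List.reverseRecOn with
  | nil => rfl
  | append_singleton cs c ih =>
    rw [posw_append, List.map_cons, List.sum_cons, List.map_map]
    have hcomp : ((fun p : Char × Int => dv p.1 * p.2) ∘ fun p : Char × Int => (p.1, 36 * p.2))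
        = fun p : Char × Int => 36 * (dv p.1 * p.2) := by
      funext p; simp [Function.comp]; ring
    rw [hcomp, PySem.List.sum_map_const_mul_int, ih]
    unfold valC
    rw [List.foldl_append]
    simp
    ring

theorem go_rev (n : Nat) : go36A n = (go36B n).reverse := by
  induction n using Nat.strongRecOn with
  | ind n ih =>
    rw [go36A, go36B]
    by_cases h : n = 0
    · simp [h]
    · simp only [h, dite_false]
      rw [ih (n / 36) (Nat.div_lt_self (Nat.pos_of_ne_zero h) (by omega))]
      simp

-- A's to_base_36 written with B's digit loop (they build the same string, back to front)
theorem conv_eq (n : Int) :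
    to_base_36 n = if n = 0 then "0" else String.ofList (go36B n.toNat).reverse := by
  unfold to_base_36
  rw [go_rev]

theorem getD_foldl_insert_add (l : List (Char × Int)) :
    ∀ (d : PySem.Dict Char Int) (c : Char),
    (l.foldl (fun d p => d.insert p.1 (d.getD p.1 0 + p.2)) d).getD c 0
      = d.getD c 0 + ((l.filter (fun p => p.1 == c)).map (·.2)).sum := by
  induction l with
  | nil => intro d c; simp
  | cons p t ih =>
    intro d c
    rw [List.foldl_cons, ih]
    by_cases h : p.1 = c
    · simp [List.filter_cons, h, PySem.Dict.getD_insert]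
      ring
    · simp [List.filter_cons, h, PySem.Dict.getD_insert, Ne.symm h]

theorem zipsum (f : String → Int) :
    ∀ (dn : List Int) (nums : List String), dn.length = nums.length →
    ((dn.zip nums).map (fun q => q.1 + f q.2)).sum = dn.sum + (nums.map f).sum := by
  intro dn
  induction dn with
  | nil =>
    intro nums h
    cases nums with
    | nil => simp
    | cons n ns => simp at h
  | cons d t ih =>
    intro nums h
    cases nums with
    | nil => simp at h
    | cons n ns =>
      simp only [List.zip_cons_cons, List.map_cons, List.sum_cons]
      rw [ih ns (by simpa using h)]
      ring

theorem sum_flatMapI {α : Type} (l : List α) (g : α → List Int) :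
    (l.flatMap g).sum = (l.map (fun x => (g x).sum)).sum := by
  rw [List.flatMap_def, List.sum_flatten, List.map_map]
  rfl

-- digit validity from Pre_
theorem valid_isSome (c : Char)
    (h : ('0' ≤ c ∧ c ≤ '9') ∨ ('A' ≤ c ∧ c ≤ 'Z') ∨ ('a' ≤ c ∧ c ≤ 'z')) :
    (digVal36 c).isSome := by
  unfold digVal36
  split_ifs <;> simp_all

theorem foldopt (cs : List Char) :
    ∀ a : Int, (∀ c ∈ cs, (digVal36 c).isSome) →
    cs.foldl (fun acc c =>
      match acc, digVal36 c with
      | some a, some v => some (36 * a + v)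
      | _, _ => none) (some a) = some (cs.foldl (fun x c => 36 * x + dv c) a) := by
  induction cs with
  | nil => intro a _; rfl
  | cons c t ih =>
    intro a h
    have hc : (digVal36 c).isSome := h c (by simp)
    obtain ⟨v, hv⟩ := Option.isSome_iff_exists.mp hc
    rw [List.foldl_cons, List.foldl_cons]
    have hdv : dv c = v := by simp [dv, hv]
    simp only [hv, hdv]
    exact ih (36 * a + v) (fun c hcmem => h c (by simp [hcmem]))

theorem to_decimal_eq (num : String) (h1 : num.toList ≠ [])
    (h2 : ∀ c ∈ num.toList, (('0' ≤ c ∧ c ≤ '9') ∨ ('A' ≤ c ∧ c ≤ 'Z') ∨ ('a' ≤ c ∧ c ≤ 'z'))) :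
    (to_decimal num).getD 0 = valC num.toList := by
  unfold to_decimal
  rw [if_neg h1, foldopt num.toList 0 (fun c hc => valid_isSome c (h2 c hc))]
  rfl

-- the inner generator of A equals (35 - dv ch) * (positional weight sum)
theorem incNumA_eq (ch : Char) (num : String) :
    incNumA ch num = (35 - dv ch) * Wnum ch num.toList := by
  unfold incNumA Wnum poswL
  rw [List.filter_map]
  simp only [List.map_map, Function.comp_def]
  rw [← PySem.List.sum_map_const_mul_int _ (35 - dv ch) (fun p : Int × Char => (36:Int) ^ p.1.toNat)]
  rfl

theorem incA_eq (numbers : List String) (ch : Char) :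
    incA numbers ch = (numbers.map (fun num => incNumA ch num)).sum := by
  unfold incA
  rw [sum_flatMapI]
  rfl

theorem incA_W (numbers : List String) (ch : Char) :
    incA numbers ch = (35 - dv ch) * Wtot numbers ch := by
  rw [incA_eq]
  unfold Wtot
  rw [← PySem.List.sum_map_const_mul_int numbers (35 - dv ch) (fun num => Wnum ch num.toList)]
  congr 1
  exact List.map_congr_left (fun num _ => incNumA_eq ch num)

-- map of snd commutes with a Python [:k] slice
theorem map_slice_k {α β : Type} (f : α → β) (xs : List α) (k : Int) :
    (PySem.List.slice xs none (some k)).map f = PySem.List.slice (xs.map f) none (some k) := by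
  by_cases hk : 0 ≤ k
  · rw [PySem.List.slice_to xs hk, PySem.List.slice_to (xs.map f) hk, List.map_take]
  · have hkk : k = -(((-k).toNat : Nat) : Int) := by omega
    have hpos : 0 < (-k).toNat := by omega
    rw [hkk, PySem.List.slice_to_neg_natCast xs _ hpos,
        PySem.List.slice_to_neg_natCast (xs.map f) _ hpos, List.map_take, List.length_map]

-- the top-k VALUES of A's (char, gain) sort equal the top-k of B's plain gain sort
theorem sel_sum_eq (l1 l2 : List Char) (g : Char → Int) (k : Int) (hperm : l1.Perm l2) :
    (PySem.List.slice (PySem.List.sorted (l1.map (fun c => (c, g c))) (fun p => p.2) true)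
      none (some k)).map (fun p => p.2)
    = PySem.List.slice (PySem.List.sorted (l2.map g) (fun x => x) true) none (some k) := by
  rw [map_slice_k]
  congr 1
  have hpw : ((PySem.List.sorted (l1.map (fun c => (c, g c))) (fun p => p.2) true).map
      (fun p : Char × Int => p.2)).Pairwise (fun a b : Int => b ≤ a) :=
    (PySem.List.sorted_pairwise_rev (l1.map (fun c => (c, g c))) (fun p => p.2)).map _
      (fun _ _ h => h)
  have hgw : (PySem.List.sorted (l2.map g) (fun x => x) true).Pairwise
      (fun a b : Int => b ≤ a) :=
    PySem.List.sorted_pairwise_rev (l2.map g) (fun x => x)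
  have hp : ((PySem.List.sorted (l1.map (fun c => (c, g c))) (fun p => p.2) true).map
      (fun p : Char × Int => p.2)).Perm
      (PySem.List.sorted (l2.map g) (fun x => x) true) := by
    refine ((PySem.List.sorted_perm (l1.map (fun c => (c, g c))) (fun p => p.2) true).map _).trans
      (List.Perm.trans ?_ (PySem.List.sorted_perm (l2.map g) (fun x => x) true).symm)
    rw [List.map_map]
    exact hperm.map _
  exact List.eq_of_perm_of_sorted (fun a b _ _ hab hba => le_antisymm hba hab) hpw hgw hp

-- summing A's elementwise update loop
theorem foldsum (numbers : List String) (sel : List (Char × Int)) :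
    ∀ dn : List Int, dn.length = numbers.length →
    (sel.foldl (fun dn p => (dn.zip numbers).map (fun q => q.1 + incNumA p.1 q.2)) dn).sum
      = dn.sum + (sel.map (fun p => (numbers.map (fun num => incNumA p.1 num)).sum)).sum := by
  induction sel with
  | nil => intro dn _; simp
  | cons p t ih =>
    intro dn h
    rw [List.foldl_cons, ih _ (by simp [h]), zipsum _ dn numbers h]
    simp [add_assoc]

theorem pairsB_fst (numbers : List String) :
    (pairsB numbers).map (fun p : Char × Int => p.1)
      = numbers.flatMap (fun num => num.toList.reverse) := by
  unfold pairsB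
  rw [List.map_flatMap]
  refine congrArg (fun g => List.flatMap g numbers) (funext fun num => ?_)
  rw [List.map_map]
  rw [show ((fun p : Char × Int => p.1) ∘ fun p : Int × Char => (p.2, (36:Int) ^ p.1.toNat))
      = fun p : Int × Char => p.2 from rfl]
  exact PySem.List.map_snd_enumerate _ 0

theorem keysA_eq (numbers : List String) :
    (numbers.foldl (fun d num =>
        num.toList.foldl (fun d c => d.insert c (d.getD c 0 + 1)) d)
        (PySem.Dict.empty : PySem.Dict Char Int)).keys
      = PySem.Set.ofList (numbers.flatMap (fun num => num.toList)) := by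
  have h : numbers.foldl (fun d num =>
      num.toList.foldl (fun d c => d.insert c (d.getD c 0 + 1)) d)
      (PySem.Dict.empty : PySem.Dict Char Int)
      = (numbers.flatMap (fun num => num.toList)).foldl
          (fun d c => d.insert c (d.getD c 0 + 1)) PySem.Dict.empty := by
    rw [List.flatMap_def, List.foldl_flatten, List.foldl_map]
  rw [h, PySem.Dict.keys_foldl_insert _ (fun d c => d.getD c 0 + 1)]
  rfl

theorem keysB_eq (numbers : List String) :
    ((pairsB numbers).foldl (fun d p =>
        d.insert p.1 (d.getD p.1 0 + p.2)) PySem.Dict.empty).keys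
      = PySem.Set.ofList ((pairsB numbers).map (fun p => p.1)) := by
  rw [PySem.Dict.keys_foldl_insert_key _ (fun p : Char × Int => p.1)
      (fun d p => d.getD p.1 0 + p.2)]
  rfl

theorem W_eq (numbers : List String) (c : Char) :
    ((pairsB numbers).foldl (fun d p =>
        d.insert p.1 (d.getD p.1 0 + p.2)) PySem.Dict.empty).getD c 0
      = Wtot numbers c := by
  rw [getD_foldl_insert_add, PySem.Dict.getD_empty, zero_add]
  rw [show pairsB numbers = numbers.flatMap (fun num => poswL num.toList) from rfl,
      List.filter_flatMap, List.map_flatMap, sum_flatMapI]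
  rfl

theorem bridge (numbers : List String) (k : Int) (CV : List Char)
    (hpre : ∀ num ∈ numbers, num.toList ≠ [] ∧ ∀ c ∈ num.toList,
      (('0' ≤ c ∧ c ≤ '9') ∨ ('A' ≤ c ∧ c ≤ 'Z') ∨ ('a' ≤ c ∧ c ≤ 'z')))
    (hCV : CV.Perm (PySem.Set.ofList ((pairsB numbers).map (fun p => p.1)))) :
    (List.foldl (fun dn p => List.map (fun q => q.1 + incNumA p.1 q.2) (dn.zip numbers))
        (List.map (fun num => (to_decimal num).getD 0) numbers)
        (PySem.List.slice (PySem.List.sorted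
            (List.foldl (fun acc c => acc ++ [(c, incA numbers c)]) [] CV)
            (fun p => p.2) true) none (some k))).sum
    = (List.map (fun p => (digVal36 p.1).getD 0 * p.2) (pairsB numbers)).sum +
      (PySem.List.slice (PySem.List.sorted
          (((pairsB numbers).foldl (fun d p => d.insert p.1 (d.getD p.1 0 + p.2))
              PySem.Dict.empty).items.map
            (fun p => (35 - (digVal36 p.1).getD 0) * p.2)) (fun x => x) true)
        none (some k)).sum := by
  rw [PySem.List.foldl_append_singleton_eq_map, List.nil_append]
  rw [foldsum numbers _ _ (List.length_map _)]
  have hdec : List.map (fun num => (to_decimal num).getD 0) numbers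
      = numbers.map (fun num => valC num.toList) :=
    List.map_congr_left (fun num hnum => to_decimal_eq num (hpre num hnum).1 (hpre num hnum).2)
  rw [hdec]
  have hsnd : ∀ p ∈ PySem.List.slice (PySem.List.sorted
        (CV.map (fun c => (c, incA numbers c))) (fun p => p.2) true) none (some k),
      (numbers.map (fun num => incNumA p.1 num)).sum = p.2 := by
    intro p hp
    have hp2 := (PySem.List.mem_sorted _ _ _ _).mp (PySem.List.mem_of_mem_slice _ _ _ hp)
    obtain ⟨c, _, rfl⟩ := List.mem_map.mp hp2
    exact (incA_eq numbers c).symm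
  rw [List.map_congr_left hsnd]
  rw [sel_sum_eq CV _ (fun c => incA numbers c) k hCV]
  have hbase : (List.map (fun p => (digVal36 p.1).getD 0 * p.2) (pairsB numbers)).sum
      = (numbers.map (fun num => valC num.toList)).sum := by
    rw [show (fun p : Char × Int => (digVal36 p.1).getD 0 * p.2)
        = fun p : Char × Int => dv p.1 * p.2 from rfl]
    rw [show pairsB numbers = numbers.flatMap (fun num => poswL num.toList) from rfl,
        List.map_flatMap, sum_flatMapI]
    exact congrArg List.sum (List.map_congr_left (fun num _ => val_eq num.toList))
  rw [hbase]
  have hkeys := keysB_eq numbers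
  have hnd : ((pairsB numbers).foldl (fun d p =>
      d.insert p.1 (d.getD p.1 0 + p.2)) PySem.Dict.empty).keys.Nodup := by
    rw [hkeys]; exact PySem.Set.nodup_ofList _
  have hgains : ((pairsB numbers).foldl (fun d p => d.insert p.1 (d.getD p.1 0 + p.2))
        PySem.Dict.empty).items.map (fun p => (35 - (digVal36 p.1).getD 0) * p.2)
      = (PySem.Set.ofList ((pairsB numbers).map (fun p => p.1))).map
          (fun c => incA numbers c) := by
    rw [PySem.Dict.items_eq_map_keys _ hnd 0, List.map_map, hkeys]
    apply List.map_congr_left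
    intro c _
    simp only [Function.comp_def]
    rw [W_eq]
    exact (incA_W numbers c).symm
  rw [hgains]


-- ===== VERDICT (by name: the statement is the Claim_ definition above) =====
theorem solve_spec : Claim_equal_solve := by
  unfold Claim_equal_solve
  intro numbers k _ hpre
  unfold Spec_solve
  simp only [solve, solve_alt]
  rw [← conv_eq]
  refine congrArg to_base_36 ?_
  refine bridge numbers k _ hpre ?_
  refine (PySem.List.sorted2_perm _ _ _ true).trans ?_
  rw [keysA_eq]
  refine (List.perm_ext_iff_of_nodup (PySem.Set.nodup_ofList _) (PySem.Set.nodup_ofList _)).mpr ?_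
  intro a
  rw [pairsB_fst]
  simp [PySem.Set.mem_ofList, List.mem_flatMap, List.mem_reverse]
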